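-- pv_equiv track=rewrite | github.com/Mogoatlhe/advent-of-code | day-5/supply_stacks_1.py | get_first_row
-- ===== SOURCE A (Python) =====
-- def get_first_row(matrix):
--
--     first_row = []
--     for i in range(len(matrix[0])):
--         for j in range(len(matrix)):
--             if matrix[j][i] != "*":
--                 first_row.append(matrix[j][i])
--                 break
--
--     return first_row
-- ===== SOURCE B (Python) =====
-- def get_first_row(matrix):
--     width = len(matrix[0])
--     found = [None] * width
--     for row in matrix:
--         for i in range(width):
--             if found[i] is None and row[i] != "*":
--                 found[i] = row[i]
--     return [c for c in found if c is not None]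
-- ===== Notes on version B (the rewrite author's own statement) =====
-- stated objective: alternative
-- what changed: B traverses the matrix row-major in a single pass, filling a per-column slot array of None sentinels with the first non-'*' seen in each column, then emits the filled slots; A scans each column top-down with an early break.
import Mathlib
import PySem

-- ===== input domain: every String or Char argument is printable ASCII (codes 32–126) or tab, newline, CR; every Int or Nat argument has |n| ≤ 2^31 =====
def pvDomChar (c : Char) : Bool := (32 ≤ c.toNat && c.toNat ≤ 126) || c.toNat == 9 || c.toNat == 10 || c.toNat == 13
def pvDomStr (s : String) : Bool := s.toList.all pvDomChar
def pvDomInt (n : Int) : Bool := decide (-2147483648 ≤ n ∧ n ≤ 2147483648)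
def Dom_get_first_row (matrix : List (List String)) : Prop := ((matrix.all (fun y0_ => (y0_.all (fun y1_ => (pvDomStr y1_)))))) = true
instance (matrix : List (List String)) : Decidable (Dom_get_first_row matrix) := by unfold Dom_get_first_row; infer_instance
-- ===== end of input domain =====

-- B makes a single row-major pass, filling a per-column slot array (none until filled)
-- with the first non-"*" seen in each column, then emits the filled slots; A scans each
-- column top-down with an early break. Same cost, a different traversal order.

-- ===== PORT A =====
-- inner loop of A: for j over the rows, break at the first entry ≠ "*"
def pvScanColA : List (List String) → Nat → Option String
  | [], _ => none
  | row :: rest, i =>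
      let c := row.getD i ""
      if c ≠ "*" then some c else pvScanColA rest i

def get_first_row (matrix : List (List String)) : List String :=
  (List.range (matrix.headD []).length).foldl (fun first_row i =>
    match pvScanColA matrix i with
    | some c => first_row ++ [c]
    | none => first_row) []

-- ===== PORT B =====
-- B's inner loop: for i in range(width), fill slot i if still empty and row[i] ≠ "*"
def pvFillRow (width : Nat) (f : List (Option String)) (row : List String) : List (Option String) :=
  (List.range width).foldl (fun f i =>
    if (f.getD i none).isNone ∧ row.getD i "" ≠ "*"
    then f.set i (some (row.getD i "")) else f) f

def get_first_row_alt (matrix : List (List String)) : List String :=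
  (matrix.foldl (pvFillRow (matrix.headD []).length)
    (List.replicate (matrix.headD []).length none)).filterMap id

-- ===== PRECONDITION & SPEC =====
-- Pre_ excludes exactly the inputs on which A raises IndexError: the empty matrix
-- (matrix[0]) and ragged matrices where some column's top-down scan, having seen only
-- in-bounds "*" entries so far, reaches a row too short for that column.
def Pre_get_first_row (matrix : List (List String)) : Prop :=
  matrix ≠ [] ∧ ∀ i ∈ List.range (matrix.headD []).length, ∀ j ∈ List.range matrix.length,
    (∀ j' ∈ List.range j, i < (matrix.getD j' []).length ∧ (matrix.getD j' []).getD i "" = "*") →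
      i < (matrix.getD j []).length
instance (matrix : List (List String)) : Decidable (Pre_get_first_row matrix) := by
  unfold Pre_get_first_row; infer_instance
def pvWitness_get_first_row : List (List String) := [["*", "a"], ["b", "*"]]

def Spec_get_first_row (matrix : List (List String)) (out : List String) : Prop := out = get_first_row_alt matrix
instance (matrix : List (List String)) (out : List String) : Decidable (Spec_get_first_row matrix out) := by unfold Spec_get_first_row; infer_instance

-- ===== CLAIM (what is proved, stated in full; the proofs are below) =====
def Claim_equal_get_first_row : Prop := ∀ (matrix : List (List String)), Dom_get_first_row matrix → Pre_get_first_row matrix → Spec_get_first_row matrix (get_first_row matrix)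

-- ===== LEMMAS AND PROOFS =====

-- per-slot effect of one row
def pvStep (row : List String) (i : Nat) (v : Option String) : Option String :=
  if v.isNone ∧ row.getD i "" ≠ "*" then some (row.getD i "") else v

theorem pvFillRow_length (width : Nat) (f : List (Option String)) (row : List String) :
    (pvFillRow width f row).length = f.length := by
  unfold pvFillRow
  induction List.range width generalizing f with
  | nil => rfl
  | cons i rest ih =>
      simp only [List.foldl_cons]
      rw [ih]
      split_ifs <;> simp

theorem pvFillRow_getD (width : Nat) (f : List (Option String)) (row : List String)
    (hw : width ≤ f.length) (k : Nat) :
    (pvFillRow width f row).getD k none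
      = if k < width then pvStep row k (f.getD k none) else f.getD k none := by
  unfold pvFillRow
  have h : ∀ (dom : List Nat), dom.Nodup → (∀ i ∈ dom, i < f.length) →
      ∀ k, ((dom.foldl (fun f i =>
        if (f.getD i none).isNone ∧ row.getD i "" ≠ "*"
        then f.set i (some (row.getD i "")) else f) f).getD k none)
      = if k ∈ dom then pvStep row k (f.getD k none) else f.getD k none := by
    clear hw
    intro dom
    induction dom generalizing f with
    | nil => simp
    | cons i rest ih =>
        intro hnd hlt k
        have hi : i < f.length := hlt i (by simp)
        have hir : i ∉ rest := (List.nodup_cons.mp hnd).1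
        have hstep : ∀ j, ((if (f.getD i none).isNone ∧ row.getD i "" ≠ "*"
            then f.set i (some (row.getD i "")) else f).getD j none)
            = if j = i then pvStep row i (f.getD i none) else f.getD j none := by
          intro j
          by_cases hc : (f.getD i none).isNone = true ∧ row.getD i "" ≠ "*"
          · rw [if_pos hc]
            by_cases hji : j = i
            · subst hji
              rw [if_pos rfl]
              simp only [pvStep]
              rw [if_pos hc]
              simp [List.getD_eq_getElem?_getD, List.getElem?_set_self hi]
            · rw [if_neg hji]
              simp [List.getD_eq_getElem?_getD, List.getElem?_set_ne (fun h => hji h.symm)]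
          · rw [if_neg hc]
            by_cases hji : j = i
            · subst hji
              rw [if_pos rfl]
              simp only [pvStep]
              rw [if_neg hc]
            · rw [if_neg hji]
        have hlen : (if (f.getD i none).isNone ∧ row.getD i "" ≠ "*"
            then f.set i (some (row.getD i "")) else f).length = f.length := by
          split_ifs <;> simp
        rw [List.foldl_cons,
          ih _ (List.Nodup.of_cons hnd) (by intro j hj; rw [hlen]; exact hlt j (by simp [hj])) k,
          hstep k]
        by_cases hk : k ∈ rest
        · have hki : k ≠ i := fun h => hir (h ▸ hk)
          simp [hk, hki]
        · by_cases hki : k = i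
          · subst hki
            simp [hk]
          · simp [hk, hki, List.mem_cons]
  rw [h (List.range width) (List.nodup_range) (by intro i hi; exact lt_of_lt_of_le (List.mem_range.mp hi) hw) k]
  simp

-- folding pvStep over the rows computes A's column scan
theorem foldl_pvStep_none (rows : List (List String)) (k : Nat) (v : Option String) :
    rows.foldl (fun v row => pvStep row k v) v
      = match v with
        | some c => some c
        | none => pvScanColA rows k := by
  induction rows generalizing v with
  | nil => cases v <;> rfl
  | cons row rest ih =>
      cases v with
      | some c =>
          rw [List.foldl_cons]
          have hs : pvStep row k (some c) = some c := by simp [pvStep]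
          rw [hs]
          exact ih (some c)
      | none =>
          rw [List.foldl_cons]
          by_cases h : row.getD k "" = "*"
          all_goals rw [List.getD_eq_getElem?_getD] at h
          · have hs : pvStep row k none = none := by
              simp [pvStep, List.getD_eq_getElem?_getD, h]
            rw [hs, ih none]
            simp [pvScanColA, List.getD_eq_getElem?_getD, h]
          · have hs : pvStep row k none = some (row.getD k "") := by
              simp [pvStep, List.getD_eq_getElem?_getD, h]
            rw [hs, ih (some _)]
            simp [pvScanColA, List.getD_eq_getElem?_getD, h]

theorem outer_fold_getD (rows : List (List String)) (width : Nat)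
    (f : List (Option String)) (hw : width ≤ f.length) (k : Nat) (hk : k < width) :
    (rows.foldl (pvFillRow width) f).getD k none
      = rows.foldl (fun v row => pvStep row k v) (f.getD k none) := by
  induction rows generalizing f with
  | nil => rfl
  | cons row rest ih =>
      simp only [List.foldl_cons]
      rw [ih _ (by rw [pvFillRow_length]; exact hw), pvFillRow_getD width f row hw k, if_pos hk]

theorem outer_fold_length (rows : List (List String)) (width : Nat) (f : List (Option String)) :
    (rows.foldl (pvFillRow width) f).length = f.length := by
  induction rows generalizing f with
  | nil => rfl
  | cons row rest ih => simp only [List.foldl_cons]; rw [ih, pvFillRow_length]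

-- the slot array after all rows is the column-scan results in column order
theorem found_eq_map (matrix : List (List String)) (width : Nat) :
    matrix.foldl (pvFillRow width) (List.replicate width none)
      = (List.range width).map (pvScanColA matrix) := by
  apply List.ext_getElem
  · rw [outer_fold_length]; simp
  · intro k h1 h2
    have hk : k < width := by simpa [outer_fold_length] using h1
    have := outer_fold_getD matrix width (List.replicate width none) (by simp) k hk
    rw [foldl_pvStep_none] at this
    have hrep : (List.replicate width (none : Option String)).getD k none = none := by
      simp [List.getD_eq_getElem?_getD, hk]
    rw [hrep] at this
    rw [List.getD_eq_getElem _ _ h1] at this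
    simp [this]

-- A's append-or-skip fold is filterMap over the column scans
theorem foldl_opt_append (g : Nat → Option String) (l : List Nat) (acc : List String) :
    l.foldl (fun fr i => match g i with | some c => fr ++ [c] | none => fr) acc
      = acc ++ (l.map g).filterMap id := by
  induction l generalizing acc with
  | nil => simp
  | cons i rest ih =>
      simp only [List.foldl_cons, List.map_cons, List.filterMap_cons]
      cases h : g i <;> simp [ih]

-- ===== VERDICT (by name: the statement is the Claim_ definition above) =====
theorem get_first_row_spec : Claim_equal_get_first_row := by
  intro matrix _ _
  show get_first_row matrix = get_first_row_alt matrix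
  unfold get_first_row get_first_row_alt
  rw [found_eq_map, foldl_opt_append]
  simp
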